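-- pv_equiv track=rewrite | github.com/daniel-reich/ubiquitous-fiesta | AqcGgqbMFhSqn44Qx_21.py | tweet
-- ===== SOURCE A (Python) =====
-- def tweet(txt):
--   words = txt.split(' ')
--   output = []
--   for word in words:
--     if word[0] in ('#@'):
--       output.append(word)
--   links = ' '.join(output)
--   outstring = ''
--   for i in links:
--     if i.isalpha() or i in '#@ ':
--       outstring += i
--   return outstring
-- ===== SOURCE B (Python) =====
-- def tweet(txt):
--   # single pass over the characters: a small state machine tracking whether we are
--   # at the start of a word and whether the current word qualified (started with # or @)
--   kept = []
--   cur = None        # the filtered characters of the current word, if it qualified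
--   start = True
--   for ch in txt:
--     if ch == ' ':
--       if cur is not None:
--         kept.append(''.join(cur))
--         cur = None
--       start = True
--     else:
--       if start:
--         cur = [ch] if ch in '#@' else None
--         start = False
--       elif cur is not None and (ch.isalpha() or ch in '#@'):
--         cur.append(ch)
--   if cur is not None:
--     kept.append(''.join(cur))
--   return ' '.join(kept)
-- ===== Notes on version B (the rewrite author's own statement) =====
-- stated objective: alternative
-- what changed: B replaces A's four staged passes (split into words, filter qualifying words, join them, rescan the joined string character by character) with a single character-level state machine over the input that tracks word starts and the current qualifying word's filtered characters; Pre_ excludes inputs with an empty chunk in txt.split(' '), on which A raises IndexError at word[0].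
-- outside the precondition, e.g. on tweet(' '): A raises IndexError, B returns ''
import Mathlib
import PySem

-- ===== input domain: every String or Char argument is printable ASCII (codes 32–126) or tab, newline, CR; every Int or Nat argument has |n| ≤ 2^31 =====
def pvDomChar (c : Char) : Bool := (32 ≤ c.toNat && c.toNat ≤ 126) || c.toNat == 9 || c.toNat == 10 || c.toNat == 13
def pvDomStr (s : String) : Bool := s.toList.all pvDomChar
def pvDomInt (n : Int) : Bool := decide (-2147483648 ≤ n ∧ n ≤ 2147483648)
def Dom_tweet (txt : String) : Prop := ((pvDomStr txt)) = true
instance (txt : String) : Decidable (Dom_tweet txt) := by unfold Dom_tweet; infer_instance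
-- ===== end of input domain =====

-- B replaces A's staged split/filter/join/rescan passes by a single character-level
-- state machine over the input (objective: alternative, same asymptotic cost).


-- ===== PORT A =====
-- i.isalpha() or i in '#@ '
def aChar (i : Char) : Bool := PySem.Chars.isalpha i || ['#', '@', ' '].contains i

def tweet (txt : String) : String :=
  -- words = txt.split(' '); output = the words with word[0] in '#@' (none = IndexError, excluded by Pre_);
  -- links = ' '.join(output); outstring = the kept characters of links
  String.ofList
    ((PySem.Chars.join [' ']
        ((PySem.Chars.splitOn txt.toList [' ']).foldl (fun acc word =>
          match PySem.List.pyGet? word 0 with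
          | none => acc
          | some c => if ['#', '@'].contains c then acc ++ [word] else acc) [])).foldl
      (fun acc i => if aChar i then acc ++ [i] else acc) [])

-- ===== PORT B =====
-- c.isalpha() or c in '#@'
def bChar (c : Char) : Bool := PySem.Chars.isalpha c || ['#', '@'].contains c

-- the loop body of Source B: state = (kept words, filtered chars of the current word if it
-- qualified, at-start-of-word flag)
def bStep (st : List (List Char) × Option (List Char) × Bool) (ch : Char) :
    List (List Char) × Option (List Char) × Bool :=
  match st with
  | (kept, cur, start) =>
    if ch = ' ' then
      ((match cur with | some c => kept ++ [c] | none => kept), none, true)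
    else if start then
      (kept, if ['#', '@'].contains ch then some [ch] else none, false)
    else
      (kept,
       (match cur with
        | some c => if bChar ch then some (c ++ [ch]) else some c
        | none => none), false)

def tweet_alt (txt : String) : String :=
  -- one pass over the characters, then flush the last word and join once
  match txt.toList.foldl bStep ([], none, true) with
  | (kept, cur, _) =>
    String.ofList (PySem.Chars.join [' ']
      (match cur with | some c => kept ++ [c] | none => kept))

-- ===== PRECONDITION & SPEC =====
-- Pre_ excludes exactly the inputs with an empty chunk in txt.split(' ') (empty txt, leading,
-- trailing or doubled spaces), on which A raises IndexError at word[0].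
def Pre_tweet (txt : String) : Prop :=
  ∀ w ∈ PySem.Chars.splitOn txt.toList [' '], w ≠ []
instance (txt : String) : Decidable (Pre_tweet txt) := by unfold Pre_tweet; infer_instance

def pvWitness_tweet : String := "#ab c @d.e"

def Spec_tweet (txt : String) (out : String) : Prop := out = tweet_alt txt
instance (txt : String) (out : String) : Decidable (Spec_tweet txt out) := by unfold Spec_tweet; infer_instance

-- ===== CLAIM (what is proved, stated in full; the proofs are below) =====
def Claim_equal_tweet : Prop := ∀ (txt : String), Dom_tweet txt → Pre_tweet txt → Spec_tweet txt (tweet txt)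

-- ===== LEMMAS AND PROOFS =====

-- chunks produced by splitting on ' ' contain no ' '
lemma go_no_space (fuel : Nat) (l cur : List Char) (acc : List (List Char)) (hf : l.length < fuel)
    (hc : ' ' ∉ cur) (ha : ∀ w ∈ acc, ' ' ∉ w) :
    ∀ w ∈ PySem.Chars.splitOn.go [' '] fuel l cur acc, ' ' ∉ w := by
  induction fuel generalizing l cur acc with
  | zero => omega
  | succ n ih =>
    cases l with
    | nil =>
      simp only [PySem.Chars.splitOn.go]
      intro w hw
      rw [List.mem_reverse] at hw
      rcases List.mem_cons.mp hw with h | h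
      · subst h; simpa using hc
      · exact ha _ h
    | cons c rest =>
      simp only [PySem.Chars.splitOn.go]
      by_cases hp : List.isPrefixOf [' '] (c :: rest) = true
      · simp only [hp, if_true]
        apply ih
        · simpa using Nat.lt_of_succ_lt_succ hf
        · simp
        · intro w hw
          rcases List.mem_cons.mp hw with h | h
          · subst h; simpa using hc
          · exact ha _ h
      · simp only [hp]
        apply ih
        · simpa using Nat.lt_of_succ_lt_succ hf
        · intro hmem
          rcases List.mem_cons.mp hmem with h | h
          · exact hp (by simp [List.isPrefixOf, ← h])
          · exact hc h
        · exact ha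

lemma splitOn_no_space (s : List Char) : ∀ w ∈ PySem.Chars.splitOn s [' '], ' ' ∉ w := by
  intro w hw
  exact go_no_space (s.length + 1) s [] [] (by omega) (by simp) (by simp) w hw

-- on spaceless chunks the two character predicates agree; on ' ' A's keeps it
lemma aChar_eq_bChar {c : Char} (h : c ≠ ' ') : aChar c = bChar c := by
  simp only [aChar, bChar, List.contains_eq_mem]
  rcases Decidable.em (c = '#') with h1 | h1 <;> rcases Decidable.em (c = '@') with h2 | h2 <;>
    simp [h, h1, h2]

lemma filter_spaceless {w : List Char} (h : ' ' ∉ w) : w.filter aChar = w.filter bChar := by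
  apply List.filter_congr
  intro c hc
  exact aChar_eq_bChar (fun he => h (he ▸ hc))

-- the key fact about A: filtering the ' '-join of spaceless words = joining the filtered words
lemma filter_join (ws : List (List Char)) (h : ∀ w ∈ ws, ' ' ∉ w) :
    (PySem.Chars.join [' '] ws).filter aChar
      = PySem.Chars.join [' '] (ws.map (fun w => w.filter bChar)) := by
  induction ws with
  | nil => simp [PySem.Chars.join_nil]
  | cons w rest ih =>
    cases rest with
    | nil =>
      simp only [List.map, PySem.Chars.join_singleton]
      exact filter_spaceless (h w (by simp))
    | cons v t =>
      have hw : ' ' ∉ w := h w (by simp)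
      have hrest : ∀ u ∈ v :: t, ' ' ∉ u := fun u hu => h u (List.mem_cons_of_mem _ hu)
      rw [PySem.Chars.join_cons_cons, List.map_cons, List.map_cons,
        PySem.Chars.join_cons_cons]
      rw [List.filter_append, List.filter_append]
      rw [← List.map_cons, ih hrest, filter_spaceless hw]
      simp [aChar]

-- the qualifying test, as a Bool predicate on a (nonempty) word
def qual (w : List Char) : Bool :=
  match PySem.List.pyGet? w 0 with
  | none => false
  | some c => ['#', '@'].contains c

lemma foldA (ws : List (List Char)) (h : ∀ w ∈ ws, w ≠ []) :
    ws.foldl (fun acc word =>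
      match PySem.List.pyGet? word 0 with
      | none => acc
      | some c => if ['#', '@'].contains c then acc ++ [word] else acc) []
    = ws.filter qual := by
  rw [PySem.List.foldl_congr_mem (g := fun acc word => if qual word then acc ++ [word] else acc)]
  · exact PySem.List.foldl_append_if_eq_filter qual ws []
  · intro acc w hw
    have : w ≠ [] := h w hw
    cases w with
    | nil => exact absurd rfl this
    | cons c cs => simp [qual, PySem.List.pyGet?, PySem.List.pyIdx?]

-- ---- B-side: running the state machine ----

-- the kept words after flushing the final state
def finKept (st : List (List Char) × Option (List Char) × Bool) : List (List Char) :=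
  match st with
  | (kept, some c, _) => kept ++ [c]
  | (kept, none, _) => kept

-- running the machine mid-word with no current qualifying word only skips characters
lemma run_mid_none (cs : List Char) (kept : List (List Char)) (h : ' ' ∉ cs) :
    cs.foldl bStep (kept, none, false) = (kept, none, false) := by
  induction cs with
  | nil => rfl
  | cons c t ih =>
    have hc : c ≠ ' ' := fun he => h (by simp [he])
    rw [List.foldl_cons, show bStep (kept, none, false) c = (kept, none, false) from by
      simp [bStep, hc]]
    exact ih (fun hm => h (List.mem_cons_of_mem _ hm))

-- running the machine mid-word with a current qualifying word filters the characters
lemma run_mid_some (cs : List Char) (kept : List (List Char)) (c0 : List Char) (h : ' ' ∉ cs) :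
    cs.foldl bStep (kept, some c0, false) = (kept, some (c0 ++ cs.filter bChar), false) := by
  induction cs generalizing c0 with
  | nil => simp
  | cons c t ih =>
    have hc : c ≠ ' ' := fun he => h (by simp [he])
    have ht : ' ' ∉ t := fun hm => h (List.mem_cons_of_mem _ hm)
    rw [List.foldl_cons, show bStep (kept, some c0, false) c
        = (kept, if bChar c then some (c0 ++ [c]) else some c0, false) from by
      simp [bStep, hc]]
    by_cases hb : bChar c = true
    · rw [if_pos hb, ih _ ht]
      simp [List.filter_cons, hb]
    · rw [if_neg hb, ih _ ht]
      simp [List.filter_cons, Bool.of_not_eq_true hb]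

-- running the machine over one nonempty spaceless word from a word start
lemma run_word (w : List Char) (kept : List (List Char)) (hne : w ≠ []) (hs : ' ' ∉ w) :
    w.foldl bStep (kept, none, true)
      = (kept, if qual w then some (w.filter bChar) else none, false) := by
  cases w with
  | nil => exact absurd rfl hne
  | cons c cs =>
    have hc : c ≠ ' ' := fun he => hs (by simp [he])
    have hcs : ' ' ∉ cs := fun hm => hs (List.mem_cons_of_mem _ hm)
    rw [List.foldl_cons]
    have hstep : bStep (kept, none, true) c
        = (kept, if ['#', '@'].contains c then some [c] else none, false) := by
      simp [bStep, hc]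
    rw [hstep]
    have hq : qual (c :: cs) = ['#', '@'].contains c := by
      simp [qual, PySem.List.pyGet?, PySem.List.pyIdx?]
    by_cases hm : ['#', '@'].contains c = true
    · rw [if_pos hm, run_mid_some cs kept [c] hcs, hq, if_pos hm]
      have hbc : bChar c = true := by
        rcases (by simpa [List.contains_eq_mem] using hm : c = '#' ∨ c = '@') with h | h <;>
          simp [bChar, h]
      simp [List.filter_cons, hbc]
    · rw [if_neg hm, run_mid_none cs kept hcs, hq, if_neg hm]

-- a ' ' step flushes the current word
lemma bStep_space (kept : List (List Char)) (cur : Option (List Char)) (st : Bool) :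
    bStep (kept, cur, st) ' ' = (finKept (kept, cur, st), none, true) := by
  cases cur <;> rfl

lemma ic_singleton (v : List Char) : [' '].intercalate [v] = v := by
  simp [List.intercalate]

lemma ic_cons_cons (v u : List Char) (s : List (List Char)) :
    [' '].intercalate (v :: u :: s) = v ++ [' '] ++ [' '].intercalate (u :: s) := by
  simp [List.intercalate]

-- intercalate with one extra word at the end
lemma intercalate_concat (X : List (List Char)) (w : List Char) :
    [' '].intercalate (X ++ [w])
      = (if X = [] then [] else [' '].intercalate X ++ [' ']) ++ w := by
  induction X with
  | nil => simp [List.intercalate]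
  | cons v t ih =>
    cases t with
    | nil => simp [List.intercalate]
    | cons u s =>
      rw [show ((u :: s) ++ [w] : List (List Char)) = u :: (s ++ [w]) from rfl] at ih
      simp [ic_cons_cons, ih]

-- the machine run over the whole ' '-intercalation of nonempty spaceless words
lemma run_words (ws : List (List Char)) (kept : List (List Char)) (hne : ws ≠ [])
    (h : ∀ w ∈ ws, w ≠ [] ∧ ' ' ∉ w) :
    finKept (([' '].intercalate ws).foldl bStep (kept, none, true))
      = kept ++ (ws.filter qual).map (fun w => w.filter bChar) := by
  induction ws generalizing kept with
  | nil => exact absurd rfl hne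
  | cons w rest ih =>
    obtain ⟨hwne, hws⟩ := h w (by simp)
    cases rest with
    | nil =>
      rw [ic_singleton, run_word w kept hwne hws]
      by_cases hq : qual w = true
      · simp [finKept, hq, List.filter_cons]
      · simp [finKept, hq, List.filter_cons, Bool.of_not_eq_true hq]
    | cons v t =>
      have hrest : ∀ u ∈ v :: t, u ≠ [] ∧ ' ' ∉ u := fun u hu => h u (List.mem_cons_of_mem _ hu)
      rw [ic_cons_cons, List.append_assoc, List.foldl_append, run_word w kept hwne hws]
      have hfold : (([' '] ++ [' '].intercalate (v :: t)).foldl bStep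
            (kept, if qual w then some (w.filter bChar) else none, false))
          = ([' '].intercalate (v :: t)).foldl bStep
              (finKept (kept, if qual w then some (w.filter bChar) else none, false), none, true) := by
        rw [List.foldl_append]
        congr 1
        simp only [List.foldl_cons, List.foldl_nil]
        exact bStep_space _ _ _
      rw [hfold, ih _ (by simp) hrest]
      by_cases hq : qual w = true
      · simp [finKept, hq, List.filter_cons]
      · simp [finKept, hq, List.filter_cons, Bool.of_not_eq_true hq]

-- ---- splitOn round trip: intercalating the chunks restores the string ----

lemma go_join (fuel : Nat) (l cur : List Char) (acc : List (List Char)) (hf : l.length < fuel) :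
    [' '].intercalate (PySem.Chars.splitOn.go [' '] fuel l cur acc)
      = [' '].intercalate (acc.reverse ++ [cur.reverse]) ++ l := by
  induction fuel generalizing l cur acc with
  | zero => omega
  | succ n ih =>
    cases l with
    | nil =>
      simp [PySem.Chars.splitOn.go]
    | cons c rest =>
      simp only [PySem.Chars.splitOn.go]
      by_cases hp : List.isPrefixOf [' '] (c :: rest) = true
      · have hc : c = ' ' := by
          cases (by simpa [List.isPrefixOf] using hp : ' ' = c ∧ True) with
          | intro h _ => exact h.symm
        rw [if_pos hp]
        rw [ih _ _ _ (by simp at hf ⊢; omega)]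
        rw [show ((cur.reverse :: acc).reverse : List (List Char))
            = acc.reverse ++ [cur.reverse] from by simp]
        rw [show (([] : List Char).reverse) = ([] : List Char) from rfl]
        rw [intercalate_concat (acc.reverse ++ [cur.reverse]) []]
        have hnn : (acc.reverse ++ [cur.reverse] : List (List Char)) ≠ [] := by simp
        rw [if_neg hnn]
        simp [hc]
      · rw [if_neg hp]
        rw [ih _ _ _ (by simp at hf ⊢; omega)]
        rw [show ((c :: cur).reverse : List Char) = cur.reverse ++ [c] from by simp]
        rw [intercalate_concat, intercalate_concat]
        by_cases ha : (acc.reverse : List (List Char)) = [] <;> simp [ha]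

lemma intercalate_splitOn_sp (s : List Char) :
    [' '].intercalate (PySem.Chars.splitOn s [' ']) = s := by
  have := go_join (s.length + 1) s [] [] (by omega)
  simpa [PySem.Chars.splitOn, List.intercalate] using this

lemma splitOn_ne_nil (s : List Char) : PySem.Chars.splitOn s [' '] ≠ [] := by
  have hgo : ∀ fuel l cur acc, PySem.Chars.splitOn.go [' '] fuel l cur acc ≠ ([] : List (List Char)) := by
    intro fuel
    induction fuel with
    | zero => intro l cur acc; simp [PySem.Chars.splitOn.go]
    | succ n ih =>
      intro l cur acc
      cases l with
      | nil => simp [PySem.Chars.splitOn.go]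
      | cons c rest =>
        simp only [PySem.Chars.splitOn.go]
        by_cases hp : List.isPrefixOf [' '] (c :: rest) = true
        · rw [if_pos hp]; exact ih _ _ _
        · rw [if_neg hp]; exact ih _ _ _
  exact hgo _ _ _ _

-- tweet_alt, re-expressed through finKept
lemma tweet_alt_eq (txt : String) :
    tweet_alt txt
      = String.ofList (PySem.Chars.join [' '] (finKept (txt.toList.foldl bStep ([], none, true)))) := by
  unfold tweet_alt
  rcases txt.toList.foldl bStep ([], none, true) with ⟨kept, cur, st⟩
  cases cur <;> rfl

-- ===== VERDICT (by name: the statement is the Claim_ definition above) =====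
theorem tweet_spec : Claim_equal_tweet := by
  intro txt _ hpre
  unfold Spec_tweet tweet
  rw [tweet_alt_eq]
  set ws := PySem.Chars.splitOn txt.toList [' '] with hws
  have hne : ∀ w ∈ ws, w ≠ [] := hpre
  have hsp : ∀ w ∈ ws, ' ' ∉ w := splitOn_no_space txt.toList
  rw [foldA _ hne]
  rw [PySem.List.foldl_append_if_eq_filter aChar _ []]
  rw [filter_join _ (fun w hw => hsp w (List.mem_of_mem_filter hw))]
  have hrun : finKept ((txt.toList).foldl bStep ([], none, true))
      = (ws.filter qual).map (fun w => w.filter bChar) := by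
    have h1 : txt.toList = [' '].intercalate ws := (intercalate_splitOn_sp txt.toList).symm
    rw [h1, run_words ws [] (splitOn_ne_nil txt.toList) (fun w hw => ⟨hne w hw, hsp w hw⟩)]
    simp
  rw [hrun]
  simp
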